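-- pv_equiv track=rewrite | github.com/DavidNemeskey/emLam | emLam/conversions.py | _reconstruct_lemma_inf
-- ===== SOURCE A (Python) =====
-- _pos_drop = {'[Nom]', '[Prs.NDef.3Sg]', '[]'}
--
-- def _reconstruct_lemma_inf(ana_parts):
--     """
--     Reconstructs the lemma and inflection based on the ana
--     parts (POS tag -> surface form mapping) we extracted from the analysis.
--
--     Note that the proper handling of comparative and superlative forms of
--     needs more work, and is not handled by the current code.
--     """
--     lemma = []
--     inf = []
--
--     # For the last non-inflection tag, we must keep the deep ("lemmatized")
--     # form, so that the word doesn't end in a linking/modified vowel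
--     keep_surface = False
--     for ana_tag, ana_deep, ana_surface in ana_parts[::-1]:
--         # Note:
--         if ana_tag.startswith('[/') or ana_tag.startswith('[_'):
--             # POS tag or derivation: fuse with lemma
--             lemma.append(ana_surface if keep_surface else ana_deep)
--             keep_surface = True
--         elif ana_tag == '[]':
--             # Degenerate
--             lemma.append(ana_surface if keep_surface else ana_deep)
--             keep_surface = True
--         elif ana_tag not in _pos_drop:
--             inf.append(ana_tag)
--
--     return ''.join(lemma[::-1]), inf[::-1]
-- ===== SOURCE B (Python) =====
-- _pos_drop = {'[Nom]', '[Prs.NDef.3Sg]', '[]'}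
--
--
-- def _is_lemma_part(tag):
--     return tag.startswith('[/') or tag.startswith('[_') or tag == '[]'
--
--
-- def _reconstruct_lemma_inf(ana_parts):
--     """Single forward pass: count the lemma-contributing tags first, then
--     count down while scanning forward; the last contributor (count == 1)
--     keeps the deep form, all earlier ones the surface form."""
--     remaining = sum(1 for tag, _, _ in ana_parts if _is_lemma_part(tag))
--     lemma = []
--     inf = []
--     for tag, deep, surface in ana_parts:
--         if _is_lemma_part(tag):
--             lemma.append(deep if remaining == 1 else surface)
--             remaining -= 1
--         elif tag not in _pos_drop:
--             inf.append(tag)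
--     return ''.join(lemma), inf
-- ===== Notes on version B (the rewrite author's own statement) =====
-- stated objective: alternative
-- what changed: A's reverse scan with a keep_surface flag and two final list reversals is replaced by a count-then-forward pass: B counts the lemma-contributing tags once, then scans forward with a countdown, giving the deep form to the last contributor and building lemma and inf in output order with no reversals.
import Mathlib
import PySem

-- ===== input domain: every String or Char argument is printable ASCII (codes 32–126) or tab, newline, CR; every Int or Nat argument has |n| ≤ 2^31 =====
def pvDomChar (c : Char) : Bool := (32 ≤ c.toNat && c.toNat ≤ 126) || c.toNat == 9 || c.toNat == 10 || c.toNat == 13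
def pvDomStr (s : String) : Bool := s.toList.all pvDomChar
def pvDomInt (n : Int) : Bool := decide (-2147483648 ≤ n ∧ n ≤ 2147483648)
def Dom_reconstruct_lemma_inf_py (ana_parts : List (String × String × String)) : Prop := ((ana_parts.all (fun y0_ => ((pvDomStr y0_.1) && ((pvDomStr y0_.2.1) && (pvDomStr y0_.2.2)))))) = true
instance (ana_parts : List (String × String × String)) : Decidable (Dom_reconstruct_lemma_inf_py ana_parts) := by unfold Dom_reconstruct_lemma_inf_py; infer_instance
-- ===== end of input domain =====

-- B replaces A's reverse scan + keep_surface flag + final reversals by a count-then-forward pass (alternative decomposition, same cost).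

-- module-level set _pos_drop, shared by both versions
def pvPosDrop : PySem.Set String := PySem.Set.ofList ["[Nom]", "[Prs.NDef.3Sg]", "[]"]

-- ===== PORT A =====
-- literal port of A's loop body over (lemma, inf, keep_surface)
def pvStepA (st : List String × List String × Bool) (p : String × String × String) :
    List String × List String × Bool :=
  let (lem, inf, keep) := st
  let (tag, deep, surface) := p
  if PySem.Str.startswith tag "[/" || PySem.Str.startswith tag "[_" then
    (lem ++ [if keep then surface else deep], inf, true)
  else if tag == "[]" then
    (lem ++ [if keep then surface else deep], inf, true)
  else if !(PySem.Set.contains pvPosDrop tag) then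
    (lem, inf ++ [tag], keep)
  else
    (lem, inf, keep)

-- literal port of A: iterate over ana_parts[::-1], then ''.join(lemma[::-1]), inf[::-1]
def reconstruct_lemma_inf_py (ana_parts : List (String × String × String)) : String × List String :=
  let st := ana_parts.reverse.foldl pvStepA ([], [], false)
  (PySem.Str.join "" st.1.reverse, st.2.1.reverse)

-- ===== PORT B =====
def pvIsLemmaPart (tag : String) : Bool :=
  PySem.Str.startswith tag "[/" || PySem.Str.startswith tag "[_" || tag == "[]"

-- B's loop body over (lemma, inf, remaining)
def pvStepB (st : List String × List String × Int) (p : String × String × String) :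
    List String × List String × Int :=
  let (lem, inf, rem) := st
  let (tag, deep, surface) := p
  if pvIsLemmaPart tag then
    (lem ++ [if rem == 1 then deep else surface], inf, rem - 1)
  else if !(PySem.Set.contains pvPosDrop tag) then
    (lem, inf ++ [tag], rem)
  else
    (lem, inf, rem)

-- literal port of B: count the contributors (sum of a 0/1 generator), one forward pass, no reversals
def reconstruct_lemma_inf_py_alt (ana_parts : List (String × String × String)) : String × List String :=
  let remaining : Int := ((ana_parts.filter (fun p => pvIsLemmaPart p.1)).map (fun _ => (1 : Int))).sum
  let st := ana_parts.foldl pvStepB ([], [], remaining)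
  (PySem.Str.join "" st.1, st.2.1)

-- ===== PRECONDITION & SPEC =====
def Spec_reconstruct_lemma_inf_py (ana_parts : List (String × String × String)) (out : String × List String) : Prop := out = reconstruct_lemma_inf_py_alt ana_parts
instance (ana_parts : List (String × String × String)) (out : String × List String) : Decidable (Spec_reconstruct_lemma_inf_py ana_parts out) := by unfold Spec_reconstruct_lemma_inf_py; infer_instance

-- ===== CLAIM (what is proved, stated in full; the proofs are below) =====
def Claim_equal_reconstruct_lemma_inf_py : Prop := ∀ (ana_parts : List (String × String × String)), Dom_reconstruct_lemma_inf_py ana_parts → Spec_reconstruct_lemma_inf_py ana_parts (reconstruct_lemma_inf_py ana_parts)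

-- ===== LEMMAS AND PROOFS =====

-- common reference: forward recursion; the last contributor keeps the deep form
def pvRef (l : List (String × String × String)) : List String × List String :=
  match l with
  | [] => ([], [])
  | (tag, deep, surface) :: rest =>
    let (lem, inf) := pvRef rest
    if pvIsLemmaPart tag then
      ((if rest.any (fun p => pvIsLemmaPart p.1) then surface else deep) :: lem, inf)
    else if PySem.Set.contains pvPosDrop tag then
      (lem, inf)
    else
      (lem, tag :: inf)

-- A's branch pair "startswith '[/' or '[_'" / "== '[]'" is one test: pvIsLemmaPart
theorem pvStepA_eq (st : List String × List String × Bool) (p : String × String × String) :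
    pvStepA st p =
      if pvIsLemmaPart p.1 then (st.1 ++ [if st.2.2 then p.2.2 else p.2.1], st.2.1, true)
      else if PySem.Set.contains pvPosDrop p.1 then st
      else (st.1, st.2.1 ++ [p.1], st.2.2) := by
  obtain ⟨lem, inf, keep⟩ := st
  obtain ⟨tag, deep, surface⟩ := p
  simp only [pvStepA, pvIsLemmaPart]
  cases h1 : PySem.Str.startswith tag "[/" <;>
    cases h2 : PySem.Str.startswith tag "[_" <;>
      cases h3 : tag == "[]" <;>
        cases h4 : PySem.Set.contains pvPosDrop tag <;> simp

theorem pvA_fold (l : List (String × String × String)) :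
    l.reverse.foldl pvStepA ([], [], false)
      = ((pvRef l).1.reverse, (pvRef l).2.reverse, l.any (fun p => pvIsLemmaPart p.1)) := by
  induction l with
  | nil => simp [pvRef]
  | cons p rest ih =>
    obtain ⟨tag, deep, surface⟩ := p
    rw [List.reverse_cons, List.foldl_append, ih]
    simp only [List.foldl_cons, List.foldl_nil, pvStepA_eq, pvRef, List.any_cons]
    by_cases h1 : pvIsLemmaPart tag
    · simp [h1]
    · by_cases h2 : tag ∈ pvPosDrop <;> simp [h1, h2]

theorem pvB_fold (l : List (String × String × String)) (lem inf : List String) :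
    l.foldl pvStepB (lem, inf, (l.countP (fun p => pvIsLemmaPart p.1) : Int))
      = (lem ++ (pvRef l).1, inf ++ (pvRef l).2, 0) := by
  induction l generalizing lem inf with
  | nil => simp [pvRef]
  | cons p rest ih =>
    obtain ⟨tag, deep, surface⟩ := p
    simp only [List.foldl_cons, List.countP_cons, pvRef]
    by_cases h1 : pvIsLemmaPart tag
    · have hrem : ((rest.countP (fun p => pvIsLemmaPart p.1) + 1 : Nat) : Int) - 1
          = (rest.countP (fun p => pvIsLemmaPart p.1) : Int) := by push_cast; omega
      have hone : (((rest.countP (fun p => pvIsLemmaPart p.1) + 1 : Nat) : Int) == 1)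
          = !(rest.any (fun p => pvIsLemmaPart p.1)) := by
        have h0 : rest.countP (fun p => pvIsLemmaPart p.1) = 0
            ↔ rest.any (fun p => pvIsLemmaPart p.1) = false := by
          simp [List.countP_eq_zero, List.any_eq_false]
        cases hany : rest.any (fun p => pvIsLemmaPart p.1) with
        | false =>
          have := h0.mpr hany
          simp [this]
        | true =>
          have hne : rest.countP (fun p => pvIsLemmaPart p.1) ≠ 0 := by
            intro h; rw [h0.mp h] at hany; cases hany
          simp only [Bool.not_true]
          rw [beq_eq_false_iff_ne]
          omega
      simp only [pvStepB, h1, if_true, hrem, hone]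
      rw [ih]
      by_cases hany : rest.any (fun p => pvIsLemmaPart p.1) <;> simp [hany]
    · have h1' : pvIsLemmaPart tag = false := by simpa using h1
      simp only [pvStepB, h1', Bool.false_eq_true, if_false, Nat.add_zero]
      by_cases h2 : tag ∈ pvPosDrop
      · rw [if_neg (by simp [h2])]
        rw [ih]
        simp [h2]
      · rw [if_pos (by simp [h2])]
        rw [ih]
        simp [h2]

theorem pvRemaining (l : List (String × String × String)) :
    ((l.filter (fun p => pvIsLemmaPart p.1)).map (fun _ => (1 : Int))).sum
      = (l.countP (fun p => pvIsLemmaPart p.1) : Int) := by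
  rw [PySem.List.sum_map_const_int]
  simp [List.countP_eq_length_filter, mul_comm]

-- ===== VERDICT (by name: the statement is the Claim_ definition above) =====
theorem reconstruct_lemma_inf_py_spec : Claim_equal_reconstruct_lemma_inf_py := by
  intro ana_parts _
  simp only [Spec_reconstruct_lemma_inf_py, reconstruct_lemma_inf_py,
    reconstruct_lemma_inf_py_alt, pvA_fold, pvRemaining, pvB_fold]
  simp
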